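-- pv_equiv track=rewrite | github.com/Sturmpuls/codewars | 6th kyu/Update inventory/Update inventory in your Smartphone store.py | update_inventory
-- ===== SOURCE A (Python) =====
-- def update_inventory(cur_stock, new_stock):
--
--     result = {}
--
--     for num, item in cur_stock + new_stock:
--
--         if item in result:
--             result[item] += num
--
--         else:
--             result[item] = num
--
--     return [(result[item], item) for item in sorted(result)]
-- ===== SOURCE B (Python) =====
-- def update_inventory(cur_stock, new_stock):
--     stock = cur_stock + new_stock
--     items = sorted({item for _, item in stock})
--     return [(sum(num for num, it in stock if it == item), item) for item in items]
-- ===== Notes on version B (the rewrite author's own statement) =====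
-- stated objective: simpler
-- what changed: Replaces the dict-accumulation loop by a declarative form: collect the distinct item names as a set, sort them, and for each item sum its quantities with a single generator expression (nested scan instead of a hash accumulator).
import Mathlib
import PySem

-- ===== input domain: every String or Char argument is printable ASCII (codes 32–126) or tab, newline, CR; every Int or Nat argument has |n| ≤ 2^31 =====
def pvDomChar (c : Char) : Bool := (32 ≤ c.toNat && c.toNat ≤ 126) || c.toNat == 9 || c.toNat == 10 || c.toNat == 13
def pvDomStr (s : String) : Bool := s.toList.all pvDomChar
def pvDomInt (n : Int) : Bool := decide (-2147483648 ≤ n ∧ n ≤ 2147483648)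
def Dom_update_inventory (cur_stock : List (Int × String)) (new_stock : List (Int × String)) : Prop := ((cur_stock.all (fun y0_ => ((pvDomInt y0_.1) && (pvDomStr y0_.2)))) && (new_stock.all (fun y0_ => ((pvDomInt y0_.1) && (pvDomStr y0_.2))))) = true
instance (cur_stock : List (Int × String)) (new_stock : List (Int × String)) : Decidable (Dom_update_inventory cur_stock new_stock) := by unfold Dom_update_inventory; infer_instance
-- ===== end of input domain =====

-- B replaces A's dict-accumulation loop by set-of-items + sorted + a per-item sum scan (simpler, declarative; not faster).

-- ===== PORT A =====
def update_inventory (cur_stock : List (Int × String)) (new_stock : List (Int × String)) : List (Int × String) :=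
  let result := (cur_stock ++ new_stock).foldl
    (fun d p => if d.contains p.2 then d.insert p.2 (d.getD p.2 0 + p.1) else d.insert p.2 p.1)
    PySem.Dict.empty
  (PySem.List.sorted result.keys (fun k => k) false).map (fun item => (result.getD item 0, item))

-- ===== PORT B =====
def update_inventory_alt (cur_stock : List (Int × String)) (new_stock : List (Int × String)) : List (Int × String) :=
  let stock := cur_stock ++ new_stock
  let items := PySem.List.sorted (PySem.Set.ofList (stock.map (fun p => p.2))) (fun k => k) false
  items.map (fun item => (((stock.filter (fun p => p.2 == item)).map (fun p => p.1)).sum, item))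

-- ===== PRECONDITION & SPEC =====
def Spec_update_inventory (cur_stock : List (Int × String)) (new_stock : List (Int × String)) (out : List (Int × String)) : Prop := out = update_inventory_alt cur_stock new_stock
instance (cur_stock : List (Int × String)) (new_stock : List (Int × String)) (out : List (Int × String)) : Decidable (Spec_update_inventory cur_stock new_stock out) := by unfold Spec_update_inventory; infer_instance

-- ===== CLAIM (what is proved, stated in full; the proofs are below) =====
def Claim_equal_update_inventory : Prop := ∀ (cur_stock : List (Int × String)) (new_stock : List (Int × String)), Dom_update_inventory cur_stock new_stock → Spec_update_inventory cur_stock new_stock (update_inventory cur_stock new_stock)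

-- ===== LEMMAS AND PROOFS =====

-- A's accumulation step, written uniformly (both branches are an insert at key p.2)
def pvStep (d : PySem.Dict String Int) (p : Int × String) : PySem.Dict String Int :=
  d.insert p.2 (d.getD p.2 0 + p.1)

theorem pvFold_eq_step (l : List (Int × String)) :
    l.foldl (fun d p => if d.contains p.2 then d.insert p.2 (d.getD p.2 0 + p.1) else d.insert p.2 p.1)
      PySem.Dict.empty = l.foldl pvStep PySem.Dict.empty := by
  apply PySem.List.foldl_congr_mem
  intro d p _
  by_cases h : d.contains p.2
  · simp [h, pvStep]
  · simp only [Bool.not_eq_true] at h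
    have h0 : d.getD p.2 0 = 0 := by simp [pysem, h]
    simp [h, pvStep, h0]

theorem pvGetD_fold_step (l : List (Int × String)) (d : PySem.Dict String Int) (k : String) :
    (l.foldl pvStep d).getD k 0
      = d.getD k 0 + ((l.filter (fun p => p.2 == k)).map (fun p => p.1)).sum := by
  induction l generalizing d with
  | nil => simp
  | cons p t ih =>
    simp only [List.foldl_cons, ih, List.filter_cons]
    by_cases h : p.2 = k
    · simp [pvStep, h]
      ring
    · have hb : (p.2 == k) = false := by simp [h]
      have h' : ¬ k = p.2 := fun hh => h hh.symm
      simp [pvStep, hb, PySem.Dict.getD_insert, h']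

theorem pvKeys_fold_step (l : List (Int × String)) :
    (l.foldl pvStep PySem.Dict.empty).keys = PySem.Set.ofList (l.map (fun p => p.2)) := by
  have h := PySem.Dict.keys_foldl_insert_key (l := l) (key := fun p => p.2)
    (f := fun d p => d.getD p.2 0 + p.1) (d := PySem.Dict.empty)
  simpa [pvStep, PySem.Set.ofList_eq_foldl, PySem.Set.update] using h

-- ===== VERDICT (by name: the statement is the Claim_ definition above) =====
theorem update_inventory_spec : Claim_equal_update_inventory := by
  intro cur_stock new_stock _
  unfold Spec_update_inventory
  simp only [update_inventory, update_inventory_alt]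
  rw [pvFold_eq_step, pvKeys_fold_step]
  apply List.map_congr_left
  intro k _
  rw [pvGetD_fold_step]
  simp
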